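-- pv_equiv track=rewrite | github.com/sworddish/bootleg_data_prep | bootleg_data_prep/utils/data_prep_utils.py | extract_allowed_comma_positions
-- ===== SOURCE A (Python) =====
-- def extract_allowed_comma_positions(sentence):
--     res = set()
--     sent_split = sentence.split()
--     for i, x in enumerate(sent_split):
--         if x.strip() == ",":
--             for j in range(4):
--                 res.add(i-j)
--                 res.add(i+j)
--     # Need to return a list so it serializes with json
--     return sorted([j for j in res if j >= 0 and j < len(sent_split)])
-- ===== SOURCE B (Python) =====
-- def extract_allowed_comma_positions(sentence):
--     sent_split = sentence.split()
--     commas = {i for i, x in enumerate(sent_split) if x.strip() == ","}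
--     return [p for p in range(len(sent_split))
--             if any(c in commas for c in range(p - 3, p + 4))]
-- ===== Notes on version B (the rewrite author's own statement) =====
-- stated objective: alternative
-- what changed: Inverts the traversal: instead of expanding each comma index outward into a set and sorting the bounds-filtered result, B builds the set of comma indices once and emits each in-range position directly in ascending order if a comma index lies within +/-3 of it, so the final sort and bounds filter disappear.
import Mathlib
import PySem

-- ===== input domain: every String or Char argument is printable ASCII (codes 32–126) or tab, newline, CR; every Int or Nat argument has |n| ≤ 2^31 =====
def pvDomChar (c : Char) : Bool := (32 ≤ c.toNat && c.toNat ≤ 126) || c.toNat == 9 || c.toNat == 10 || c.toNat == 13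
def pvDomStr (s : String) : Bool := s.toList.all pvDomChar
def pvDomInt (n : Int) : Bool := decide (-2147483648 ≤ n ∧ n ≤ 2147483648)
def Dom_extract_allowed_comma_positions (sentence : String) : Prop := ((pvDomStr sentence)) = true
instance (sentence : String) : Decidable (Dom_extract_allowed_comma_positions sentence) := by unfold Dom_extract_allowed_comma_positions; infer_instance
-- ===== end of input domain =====

-- B inverts A's traversal: it collects the comma token indices once, then emits each
-- in-range position in ascending order if a comma index lies within ±3 of it, so A's
-- final sort and bounds filter disappear (objective: alternative algorithm, same cost class).

-- ===== PORT A =====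
def extract_allowed_comma_positions (sentence : String) : List Int :=
  let sent_split := PySem.Str.split₀ sentence
  let res : PySem.Set Int :=
    (PySem.List.enumerate sent_split 0).foldl
      (fun res p =>
        if PySem.Str.strip p.2 == "," then
          (PySem.List.pyRange 0 4 1).foldl
            (fun res j => PySem.Set.add (PySem.Set.add res (p.1 - j)) (p.1 + j)) res
        else res)
      PySem.Set.empty
  PySem.List.sorted
    (res.filter (fun j => decide ((0:Int) ≤ j) && decide (j < (sent_split.length : Int))))
    (fun x => x) false

-- ===== PORT B =====
def extract_allowed_comma_positions_alt (sentence : String) : List Int :=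
  let sent_split := PySem.Str.split₀ sentence
  let commas : PySem.Set Int :=
    PySem.Set.ofList ((PySem.List.enumerate sent_split 0).filterMap
      (fun p => if PySem.Str.strip p.2 == "," then some p.1 else none))
  (PySem.List.pyRange 0 (sent_split.length : Int) 1).filter
    (fun p => (PySem.List.pyRange (p - 3) (p + 4) 1).any
      (fun c => PySem.Set.contains commas c))

-- ===== PRECONDITION & SPEC =====
def Spec_extract_allowed_comma_positions (sentence : String) (out : List Int) : Prop := out = extract_allowed_comma_positions_alt sentence
instance (sentence : String) (out : List Int) : Decidable (Spec_extract_allowed_comma_positions sentence out) := by unfold Spec_extract_allowed_comma_positions; infer_instance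

-- ===== CLAIM (what is proved, stated in full; the proofs are below) =====
def Claim_equal_extract_allowed_comma_positions : Prop := ∀ (sentence : String), Dom_extract_allowed_comma_positions sentence → Spec_extract_allowed_comma_positions sentence (extract_allowed_comma_positions sentence)

-- ===== LEMMAS AND PROOFS =====

-- the inner loop of A: membership after adding i-j, i+j for j = 0..3
theorem pv_mem_inner (res : PySem.Set Int) (i k : Int) :
    (k ∈ (PySem.List.pyRange 0 4 1).foldl
        (fun r j => PySem.Set.add (PySem.Set.add r (i - j)) (i + j)) res) ↔
      k ∈ res ∨ (i - 3 ≤ k ∧ k ≤ i + 3) := by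
  have h4 : PySem.List.pyRange 0 4 1 = [0, 1, 2, 3] := by decide
  simp only [h4, List.foldl_cons, List.foldl_nil, PySem.Set.mem_add]
  by_cases h : k ∈ res
  · simp [h]
  · simp only [h, false_or]
    omega

theorem pv_nodup_inner (res : PySem.Set Int) (i : Int) (h : res.Nodup) :
    ((PySem.List.pyRange 0 4 1).foldl
        (fun r j => PySem.Set.add (PySem.Set.add r (i - j)) (i + j)) res).Nodup := by
  have h4 : PySem.List.pyRange 0 4 1 = [0, 1, 2, 3] := by decide
  simp only [h4, List.foldl_cons, List.foldl_nil]
  repeat' apply PySem.Set.nodup_add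
  exact h

-- the outer loop of A: membership after processing the enumerated tokens in l
theorem pv_mem_outer (l : List (Int × String)) (res : PySem.Set Int) (k : Int) :
    (k ∈ l.foldl
        (fun res p =>
          if PySem.Str.strip p.2 == "," then
            (PySem.List.pyRange 0 4 1).foldl
              (fun r j => PySem.Set.add (PySem.Set.add r (p.1 - j)) (p.1 + j)) res
          else res) res) ↔
      k ∈ res ∨ ∃ p ∈ l, (PySem.Str.strip p.2 == ",") = true ∧ p.1 - 3 ≤ k ∧ k ≤ p.1 + 3 := by
  induction l generalizing res with
  | nil => simp
  | cons q t ih =>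
    simp only [List.foldl_cons, List.mem_cons]
    by_cases hq : (PySem.Str.strip q.2 == ",") = true
    · rw [if_pos hq, ih]
      rw [pv_mem_inner]
      constructor
      · rintro ((h | h) | ⟨p, hp, hc, hb⟩)
        · exact Or.inl h
        · exact Or.inr ⟨q, Or.inl rfl, hq, h⟩
        · exact Or.inr ⟨p, Or.inr hp, hc, hb⟩
      · rintro (h | ⟨p, (rfl | hp), hc, hb⟩)
        · exact Or.inl (Or.inl h)
        · exact Or.inl (Or.inr hb)
        · exact Or.inr ⟨p, hp, hc, hb⟩
    · rw [if_neg hq, ih]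
      constructor
      · rintro (h | ⟨p, hp, hc, hb⟩)
        · exact Or.inl h
        · exact Or.inr ⟨p, Or.inr hp, hc, hb⟩
      · rintro (h | ⟨p, (rfl | hp), hc, hb⟩)
        · exact Or.inl h
        · exact absurd hc hq
        · exact Or.inr ⟨p, hp, hc, hb⟩

theorem pv_nodup_outer (l : List (Int × String)) (res : PySem.Set Int) (h : res.Nodup) :
    (l.foldl
        (fun res p =>
          if PySem.Str.strip p.2 == "," then
            (PySem.List.pyRange 0 4 1).foldl
              (fun r j => PySem.Set.add (PySem.Set.add r (p.1 - j)) (p.1 + j)) res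
          else res) res).Nodup := by
  induction l generalizing res with
  | nil => exact h
  | cons q t ih =>
    simp only [List.foldl_cons]
    by_cases hq : (PySem.Str.strip q.2 == ",") = true
    · rw [if_pos hq]; exact ih _ (pv_nodup_inner _ _ h)
    · rw [if_neg hq]; exact ih _ h

-- ===== VERDICT (by name: the statement is the Claim_ definition above) =====
theorem extract_allowed_comma_positions_spec : Claim_equal_extract_allowed_comma_positions := by
  intro sentence _
  unfold Spec_extract_allowed_comma_positions
  unfold extract_allowed_comma_positions extract_allowed_comma_positions_alt
  set toks := PySem.Str.split₀ sentence with htoks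
  set l := PySem.List.enumerate toks 0 with hl
  set n : Int := (toks.length : Int) with hn
  -- B's output
  set Bout := (PySem.List.pyRange 0 n 1).filter
    (fun p => (PySem.List.pyRange (p - 3) (p + 4) 1).any
      (fun c => PySem.Set.contains
        (PySem.Set.ofList (l.filterMap
          (fun p => if PySem.Str.strip p.2 == "," then some p.1 else none))) c)) with hB
  -- A's set, filtered
  set resF := ((l.foldl
      (fun res p =>
        if PySem.Str.strip p.2 == "," then
          (PySem.List.pyRange 0 4 1).foldl
            (fun r j => PySem.Set.add (PySem.Set.add r (p.1 - j)) (p.1 + j)) res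
        else res) PySem.Set.empty).filter
      (fun j => decide ((0:Int) ≤ j) && decide (j < n))) with hF
  -- common membership characterisation
  have hmem : ∀ k : Int, (k ∈ Bout ↔ k ∈ resF) := by
    intro k
    rw [hB, hF]
    simp only [List.mem_filter, PySem.List.mem_pyRange_one, List.any_eq_true,
      PySem.Set.contains_iff, PySem.Set.mem_ofList, List.mem_filterMap,
      pv_mem_outer, PySem.Set.empty]
    constructor
    · rintro ⟨⟨h0, hk⟩, c, ⟨hc1, hc2⟩, p, hp, hpc⟩
      split_ifs at hpc with hcond
      · simp only [Option.some_inj] at hpc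
        refine ⟨Or.inr ⟨p, hp, hcond, by omega⟩, ?_⟩
        simp only [Bool.and_eq_true, decide_eq_true_eq]
        exact ⟨h0, hk⟩
    · rintro ⟨h, hrange⟩
      simp only [Bool.and_eq_true, decide_eq_true_eq] at hrange
      rcases h with h | ⟨p, hp, hcond, hb1, hb2⟩
      · simp at h
      · exact ⟨hrange, p.1, ⟨by omega, by omega⟩, p, hp, by rw [if_pos hcond]⟩
  -- both sides are nodup
  have hnodupB : Bout.Nodup := (PySem.List.nodup_pyRange_one 0 n).filter _
  have hnodupF : resF.Nodup := (pv_nodup_outer l PySem.Set.empty List.nodup_nil).filter _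
  have hperm : Bout.Perm resF := (List.perm_ext_iff_of_nodup hnodupB hnodupF).2 hmem
  have hpw : Bout.Pairwise (fun a b : Int => (fun x => x) a < (fun x => x) b) :=
    (PySem.List.pairwise_lt_pyRange_one 0 n).filter _
  exact PySem.List.sorted_eq_of_perm_of_pairwise_lt resF Bout (fun x => x) hperm hpw
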